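-- pv_equiv track=rewrite | github.com/delgor/aoc-2023-py | 11/combined.py | grid_expanded_costs
-- ===== SOURCE A (Python) =====
-- def row_empty(grid, row):
--     for elem in grid[row]:
--         if elem == "#":
--             return False
--     return True
--
-- def col_empty(grid, col):
--     for idx in range(len(grid[0])):
--         if grid[idx][col] == "#":
--             return False
--     return True
--
-- def grid_expanded_costs(orig_grid, cost=2):
--     cost_grid = [[1] * len(orig_grid[0]) for _ in range(len(orig_grid))]
--
--     # Expand in Y direction
--     for orig_y in range(0, len(orig_grid)):
--         if row_empty(orig_grid, orig_y):
--             for orig_x in range(len(orig_grid[orig_y])):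
--                 cost_grid[orig_y][orig_x] = cost
--
--     # Expand in X direction
--     for orig_x in range(0, len(orig_grid[0])):
--         if col_empty(orig_grid, orig_x):
--             for orig_y in range(len(orig_grid)):
--                 cost_grid[orig_y][orig_x] = cost
--
--     return cost_grid
-- ===== SOURCE B (Python) =====
-- def grid_expanded_costs(orig_grid, cost=2):
--     height, width = len(orig_grid), len(orig_grid[0])
--     rows_occ, cols_occ = set(), set()
--     for y, row in enumerate(orig_grid):
--         for x, elem in enumerate(row):
--             if elem == "#":
--                 rows_occ.add(y)
--                 cols_occ.add(x)
--     return [[1 if y in rows_occ and x in cols_occ else cost for x in range(width)]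
--             for y in range(height)]
-- ===== Notes on version B (the rewrite author's own statement) =====
-- stated objective: alternative
-- what changed: B inverts the problem: instead of A's two overwriting fill passes driven by per-row and per-column emptiness scans (col_empty re-scans rows for every column), B makes one pass over the cells collecting the sets of rows and columns that CONTAIN a '#', then emits the grid from an all-cost default with 1 exactly where both the row and the column are occupied (De Morgan of A's OR of emptiness); the column helper re-scans disappear; B also fixes col_empty's evident slip of scanning range(len(grid[0])) (the width) instead of the row count.
-- intended difference: On rectangular grids with cost != 1 where some column has no '#' in the first width rows but a '#' below row width-1, A marks that column empty (col_empty scans only range(len(grid[0])) rows) and fills it with cost, while B checks the whole column and returns 1 there; B's full-column check is the intended column-emptiness. — e.g. on grid_expanded_costs([["."], ["#"]], 2): A returns [[2], [2]], B returns [[2], [1]]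
-- outside the precondition, e.g. on grid_expanded_costs([['#'], []], 2): A returns [[1], [1]], B returns [[1], [2]]
import Mathlib
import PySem

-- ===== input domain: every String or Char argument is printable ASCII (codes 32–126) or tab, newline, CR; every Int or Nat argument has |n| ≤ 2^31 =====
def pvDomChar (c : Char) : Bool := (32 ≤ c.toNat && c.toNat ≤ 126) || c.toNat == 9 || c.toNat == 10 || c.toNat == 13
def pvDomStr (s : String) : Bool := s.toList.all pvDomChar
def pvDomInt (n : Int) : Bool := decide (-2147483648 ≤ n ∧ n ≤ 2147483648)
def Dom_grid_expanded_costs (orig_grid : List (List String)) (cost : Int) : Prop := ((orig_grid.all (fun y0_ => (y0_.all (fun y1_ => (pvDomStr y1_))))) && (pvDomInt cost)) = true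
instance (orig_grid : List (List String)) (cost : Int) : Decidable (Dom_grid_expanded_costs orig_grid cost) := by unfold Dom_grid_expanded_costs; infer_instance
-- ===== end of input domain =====

-- B inverts the problem: one pass over the cells collects the SETS of rows/columns that contain
-- a '#', then the grid is emitted from an all-cost default with 1 exactly where both the row and
-- the column are occupied (De Morgan of A's two emptiness-driven fill passes); B also fixes
-- col_empty's slip of scanning range(len(grid[0])) (the width) instead of the row count.

-- ===== PORT A =====
-- row_empty: 'for elem in grid[row]: if elem == "#": return False; return True'
def pvRowLoopA : List String → Bool
  | [] => true
  | e :: rest => if e = "#" then false else pvRowLoopA rest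

-- grid[row] is always in range where A calls it, so getD is exact there
def pvRowEmptyA (grid : List (List String)) (row : Nat) : Bool :=
  pvRowLoopA (grid.getD row [])

-- col_empty: 'for idx in range(len(grid[0])): if grid[idx][col] == "#": return False; return True'
-- a 'none' from pyGet? is Python's IndexError; those inputs are outside Pre_
def pvColLoopA (grid : List (List String)) (col : Int) : List Int → Bool
  | [] => true
  | i :: rest =>
    if ((PySem.List.pyGet? grid i).bind (fun r => PySem.List.pyGet? r col)) = some "#" then false
    else pvColLoopA grid col rest

def pvColEmptyA (grid : List (List String)) (col : Int) : Bool :=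
  pvColLoopA grid col (PySem.List.pyRange 0 (((grid.headD []).length : Int)) 1)

-- 'cost_grid[y][x] = v' (indices always in range where A executes it inside Pre_)
def pvSetCell (cg : List (List Int)) (y x : Nat) (v : Int) : List (List Int) :=
  cg.set y ((cg.getD y []).set x v)

def grid_expanded_costs (orig_grid : List (List String)) (cost : Int) : List (List Int) :=
  if orig_grid = [] then []  -- Python raises IndexError on orig_grid[0]; outside Pre_
  else
    let W := (orig_grid.headD []).length
    let init := List.replicate orig_grid.length (List.replicate W (1 : Int))
    let afterY := (List.range orig_grid.length).foldl
      (fun cg y =>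
        if pvRowEmptyA orig_grid y then
          (List.range (orig_grid.getD y []).length).foldl (fun cg x => pvSetCell cg y x cost) cg
        else cg) init
    (List.range W).foldl
      (fun cg x =>
        if pvColEmptyA orig_grid (Int.ofNat x) then
          (List.range orig_grid.length).foldl (fun cg y => pvSetCell cg y x cost) cg
        else cg) afterY

-- ===== PORT B =====
def grid_expanded_costs_alt (orig_grid : List (List String)) (cost : Int) : List (List Int) :=
  if orig_grid = [] then []  -- Python raises IndexError on orig_grid[0]; outside Pre_
  else
    let height := orig_grid.length
    let width := (orig_grid.headD []).length
    -- 'for y, row in enumerate(orig_grid): for x, elem in enumerate(row): if elem == "#": add y / add x'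
    let occ := (PySem.List.enumerate orig_grid).foldl
      (fun (st : PySem.Set Int × PySem.Set Int) yr =>
        (PySem.List.enumerate yr.2).foldl
          (fun st xe =>
            if xe.2 = "#" then (PySem.Set.add st.1 yr.1, PySem.Set.add st.2 xe.1) else st)
          st)
      (PySem.Set.empty, PySem.Set.empty)
    (List.range height).map (fun (y : Nat) =>
      (List.range width).map (fun (x : Nat) =>
        if PySem.Set.contains occ.1 (Int.ofNat y) && PySem.Set.contains occ.2 (Int.ofNat x)
        then 1 else cost))

-- ===== PRECONDITION & SPEC =====
-- grid width (length of row 0) and the cell at row y, column x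
def pvW (og : List (List String)) : Nat := (og.headD []).length
def pvCell (og : List (List String)) (y x : Nat) : String := (og.getD y []).getD x ""
-- index of the first row whose column-x entry is "#" (= row count if none)
def pvHx (og : List (List String)) (x : Nat) : Nat := (og.map fun r => r.getD x "").idxOf "#"

-- Pre_ excludes: the empty grid and ragged (non-rectangular) grids — outside the natural grid
-- domain, A's behaviour there is an indexing accident mixing row lengths with the width — and
-- rectangular grids with more columns than rows on which A's col_empty runs past the last row
-- (there A raises IndexError unless every column has a '#' within the grid).
def Pre_grid_expanded_costs (orig_grid : List (List String)) (cost : Int) : Prop :=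
  orig_grid ≠ [] ∧
  (∀ r ∈ orig_grid, r.length = pvW orig_grid) ∧
  (pvW orig_grid ≤ orig_grid.length ∨
    ∀ x < pvW orig_grid, ∃ y < orig_grid.length, pvCell orig_grid y x = "#")

instance (orig_grid : List (List String)) (cost : Int) : Decidable (Pre_grid_expanded_costs orig_grid cost) := by
  unfold Pre_grid_expanded_costs; infer_instance

def pvWitness_grid_expanded_costs : List (List String) × Int := ([[".", "#"], [".", "."]], 2)

-- On rectangular grids with cost ≠ 1 where some column has no "#" in the first `width` rows but
-- a "#" below, A marks the column empty (col_empty scans only range(len(grid[0])) rows) and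
-- fills it with cost, while B checks the whole column and returns 1 there; B's full-column
-- check is the intended column-emptiness.
def D_grid_expanded_costs (orig_grid : List (List String)) (cost : Int) : Prop :=
  cost ≠ 1 ∧
  ∃ x < pvW orig_grid, pvW orig_grid ≤ pvHx orig_grid x ∧ pvHx orig_grid x < orig_grid.length

instance (orig_grid : List (List String)) (cost : Int) : Decidable (D_grid_expanded_costs orig_grid cost) := by
  unfold D_grid_expanded_costs; infer_instance

def Spec_grid_expanded_costs (orig_grid : List (List String)) (cost : Int) (out : List (List Int)) : Prop :=
  ¬ D_grid_expanded_costs orig_grid cost → out = grid_expanded_costs_alt orig_grid cost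
instance (orig_grid : List (List String)) (cost : Int) (out : List (List Int)) : Decidable (Spec_grid_expanded_costs orig_grid cost out) := by
  unfold Spec_grid_expanded_costs; infer_instance

def pvDiffWitness_grid_expanded_costs : List (List String) × Int := ([["."], ["#"]], 2)
def pvDiffWitnessOut_grid_expanded_costs : (List (List Int)) × (List (List Int)) := ([[2], [2]], [[2], [1]])

-- ===== CLAIM =====
def Claim_unchanged_grid_expanded_costs : Prop := ∀ (orig_grid : List (List String)) (cost : Int), Dom_grid_expanded_costs orig_grid cost → Pre_grid_expanded_costs orig_grid cost → Spec_grid_expanded_costs orig_grid cost (grid_expanded_costs orig_grid cost)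
def Claim_changed_grid_expanded_costs : Prop := Dom_grid_expanded_costs (pvDiffWitness_grid_expanded_costs.1) (pvDiffWitness_grid_expanded_costs.2) ∧ Pre_grid_expanded_costs (pvDiffWitness_grid_expanded_costs.1) (pvDiffWitness_grid_expanded_costs.2) ∧ D_grid_expanded_costs (pvDiffWitness_grid_expanded_costs.1) (pvDiffWitness_grid_expanded_costs.2) ∧ grid_expanded_costs (pvDiffWitness_grid_expanded_costs.1) (pvDiffWitness_grid_expanded_costs.2) = pvDiffWitnessOut_grid_expanded_costs.1 ∧ grid_expanded_costs_alt (pvDiffWitness_grid_expanded_costs.1) (pvDiffWitness_grid_expanded_costs.2) = pvDiffWitnessOut_grid_expanded_costs.2 ∧ pvDiffWitnessOut_grid_expanded_costs.1 ≠ pvDiffWitnessOut_grid_expanded_costs.2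
def Claim_exact_grid_expanded_costs : Prop := ∀ (orig_grid : List (List String)) (cost : Int), Dom_grid_expanded_costs orig_grid cost → Pre_grid_expanded_costs orig_grid cost → D_grid_expanded_costs orig_grid cost → grid_expanded_costs orig_grid cost ≠ grid_expanded_costs_alt orig_grid cost

-- ===== LEMMAS AND PROOFS =====

theorem pvRowLoopA_eq_contains (r : List String) : pvRowLoopA r = !(r.contains "#") := by
  induction r with
  | nil => rfl
  | cons e rest ih =>
    by_cases h : e = "#"
    · simp [pvRowLoopA, h]
    · simp only [pvRowLoopA, if_neg h, ih]
      simp [eq_comm, h]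

theorem pvColLoopA_eq_true_iff (g : List (List String)) (c : Int) (idxs : List Int) :
    pvColLoopA g c idxs = true ↔
      ∀ i ∈ idxs, ((PySem.List.pyGet? g i).bind (fun r => PySem.List.pyGet? r c)) ≠ some "#" := by
  induction idxs with
  | nil => simp [pvColLoopA]
  | cons i rest ih =>
    by_cases h : ((PySem.List.pyGet? g i).bind (fun r => PySem.List.pyGet? r c)) = some "#" <;>
      simp [pvColLoopA, h, ih]

-- characterisation of A's col_empty: it scans rows 0..W-1, rows past the grid read as 'none'
theorem pvColEmptyA_eq_true_iff (g : List (List String)) (x : Nat)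
    (hrect : ∀ r ∈ g, r.length = (g.headD []).length) (hx : x < (g.headD []).length) :
    pvColEmptyA g (x : Int) = true ↔
      ∀ i < min (g.headD []).length g.length, (g.getD i []).getD x "" ≠ "#" := by
  unfold pvColEmptyA
  rw [pvColLoopA_eq_true_iff]
  constructor
  · intro hf n hn
    have hnW : n < (g.headD []).length := lt_of_lt_of_le hn (Nat.min_le_left _ _)
    have hnH : n < g.length := lt_of_lt_of_le hn (Nat.min_le_right _ _)
    have hmem : ((n : Nat) : Int) ∈ PySem.List.pyRange 0 (((g.headD []).length : Nat) : Int) 1 := by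
      rw [PySem.List.mem_pyRange_one]
      constructor
      · exact Int.natCast_nonneg n
      · exact_mod_cast hnW
    have hb := hf _ hmem
    intro hEq
    apply hb
    have hxlen : x < (g[n]).length := by
      rw [hrect g[n] (List.getElem_mem hnH)]; exact hx
    rw [PySem.List.pyGet?_natCast, List.getElem?_eq_getElem hnH]
    simp only [Option.bind_some, PySem.List.pyGet?_natCast]
    rw [List.getElem?_eq_getElem hxlen]
    have hgd : (g.getD n []).getD x "" = (g[n])[x] := by
      rw [List.getD_eq_getElem _ _ hnH, List.getD_eq_getElem _ _ hxlen]
    rw [← hgd, hEq]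
  · intro hall i hi
    rw [PySem.List.mem_pyRange_one] at hi
    obtain ⟨h0, hiW⟩ := hi
    have hiW' : i.toNat < (g.headD []).length := by omega
    by_cases hnH : i.toNat < g.length
    · have h := hall i.toNat (by omega)
      intro hEq
      apply h
      have hxlen : x < (g[i.toNat]).length := by
        rw [hrect g[i.toNat] (List.getElem_mem hnH)]; exact hx
      rw [show i = ((i.toNat : Nat) : Int) by omega, PySem.List.pyGet?_natCast,
        List.getElem?_eq_getElem hnH] at hEq
      simp only [Option.bind_some, PySem.List.pyGet?_natCast] at hEq
      rw [List.getElem?_eq_getElem hxlen] at hEq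
      rw [List.getD_eq_getElem _ _ hnH, List.getD_eq_getElem _ _ hxlen]
      exact Option.some.inj hEq
    · rw [show i = ((i.toNat : Nat) : Int) by omega, PySem.List.pyGet?_natCast,
        List.getElem?_eq_none (by omega)]
      simp

-- range-fold filling a prefix with a constant
theorem pvFillPrefix (c : Int) (n : Nat) (r : List Int) (h : n ≤ r.length) :
    (List.range n).foldl (fun r x => r.set x c) r = List.replicate n c ++ r.drop n := by
  induction n with
  | zero => simp
  | succ n ih =>
    have hn : n < r.length := by omega
    rw [List.range_succ, List.foldl_append, ih (by omega), List.drop_eq_getElem_cons hn]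
    simp [List.set_append, List.replicate_succ', List.append_assoc]
    rw [List.drop_eq_getElem_cons hn, List.set_cons_zero]

-- range-fold conditionally overwriting a prefix
theorem pvCondFillPrefix (q : Nat → Bool) (c : Int) (n : Nat) (r : List Int) (h : n ≤ r.length) :
    (List.range n).foldl (fun r x => if q x then r.set x c else r) r
      = (List.range n).map (fun x => if q x then c else r.getD x 0) ++ r.drop n := by
  induction n with
  | zero => simp
  | succ n ih =>
    have hn : n < r.length := by omega
    rw [List.range_succ, List.foldl_append, ih (by omega), List.drop_eq_getElem_cons hn,
      List.map_append]
    by_cases hq : q n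
    · simp [hq, List.set_append, List.append_assoc]
      rw [List.drop_eq_getElem_cons hn, List.set_cons_zero]
    · simp [hq, List.append_assoc, List.getD_eq_getElem r 0 hn]
      rw [List.drop_eq_getElem_cons hn]
      simp [List.getElem?_eq_getElem hn]

-- the inner Y fill only rewrites row y
theorem pvRowFold (y : Nat) (c : Int) (xs : List Nat) (cg : List (List Int)) :
    xs.foldl (fun cg x => pvSetCell cg y x c) cg
      = cg.set y (xs.foldl (fun r x => r.set x c) (cg.getD y [])) := by
  induction xs generalizing cg with
  | nil =>
    simp only [List.foldl_nil]
    by_cases hy : y < cg.length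
    · rw [List.getD_eq_getElem?_getD, List.getElem?_eq_getElem hy]
      simp
    · rw [List.set_eq_of_length_le (by omega)]
  | cons x xs ih =>
    simp only [List.foldl_cons]
    rw [show pvSetCell cg y x c = cg.set y ((cg.getD y []).set x c) from rfl, ih]
    by_cases hy : y < cg.length
    · rw [List.set_set]
      congr 1
      rw [List.getD_eq_getElem?_getD, List.getElem?_set_self hy]
      simp
    · have h1 : cg.set y ((cg.getD y []).set x c) = cg := List.set_eq_of_length_le (by omega)
      have h2 : cg.getD y [] = [] := by
        rw [List.getD_eq_getElem?_getD, List.getElem?_eq_none (by omega)]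
        rfl
      rw [h1, h2]
      simp

-- the inner X fill rewrites position x of every row
theorem pvColFold (x : Nat) (c : Int) (n : Nat) (cg : List (List Int)) (h : n ≤ cg.length) :
    (List.range n).foldl (fun cg y => pvSetCell cg y x c) cg
      = (cg.take n).map (fun r => r.set x c) ++ cg.drop n := by
  induction n with
  | zero => simp
  | succ n ih =>
    have hn : n < cg.length := by omega
    have hlen : ((cg.take n).map (fun r => r.set x c)).length = n := by
      simp [List.length_take, Nat.min_eq_left (le_of_lt hn)]
    rw [List.range_succ, List.foldl_append, ih (by omega)]
    simp only [List.foldl_cons, List.foldl_nil]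
    rw [show ∀ cg' : List (List Int), pvSetCell cg' n x c
        = cg'.set n ((cg'.getD n []).set x c) from fun _ => rfl]
    have hget : ((cg.take n).map (fun r => r.set x c) ++ cg.drop n).getD n [] = cg[n] := by
      rw [List.getD_eq_getElem?_getD, List.getElem?_append_right (by omega), hlen]
      rw [Nat.sub_self, List.drop_eq_getElem_cons hn]
      simp [List.getElem?_eq_getElem hn]
    rw [hget, List.set_append]
    rw [if_neg (by omega), hlen, Nat.sub_self, List.drop_eq_getElem_cons hn,
      List.set_cons_zero]
    rw [List.take_add_one, List.getElem?_eq_getElem hn]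
    simp only [Option.toList_some, List.map_append, List.map_cons, List.map_nil,
      List.append_assoc, List.cons_append, List.nil_append]

-- the Y pass: each empty row is overwritten with a row of cost
theorem pvYFold (og : List (List String)) (cost : Int) (n : Nat)
    (hrect' : ∀ y < og.length, (og.getD y []).length = (og.headD []).length)
    (hn : n ≤ og.length) :
    (List.range n).foldl
      (fun cg y =>
        if pvRowEmptyA og y then
          (List.range (og.getD y []).length).foldl (fun cg x => pvSetCell cg y x cost) cg
        else cg)
      (List.replicate og.length (List.replicate (og.headD []).length (1 : Int)))
    = (List.range n).map (fun y =>
        List.replicate (og.headD []).length (if pvRowEmptyA og y then cost else (1 : Int)))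
      ++ (List.replicate og.length (List.replicate (og.headD []).length (1 : Int))).drop n := by
  induction n with
  | zero => simp
  | succ n ih =>
    set init := List.replicate og.length (List.replicate (og.headD []).length (1 : Int)) with hinit
    have hnH : n < init.length := by simp [hinit]; omega
    have hinitn : init[n] = List.replicate (og.headD []).length (1 : Int) := by
      simp [hinit]
    have hlen : ((List.range n).map (fun y =>
        List.replicate (og.headD []).length (if pvRowEmptyA og y then cost else (1 : Int)))).length = n := by
      simp
    rw [List.range_succ, List.foldl_append, ih (by omega)]
    simp only [List.foldl_cons, List.foldl_nil]
    rw [List.map_append]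
    have hget : ((List.range n).map (fun y =>
        List.replicate (og.headD []).length (if pvRowEmptyA og y then cost else (1 : Int)))
        ++ init.drop n).getD n [] = List.replicate (og.headD []).length (1 : Int) := by
      rw [List.getD_eq_getElem?_getD, List.getElem?_append_right (by omega), hlen,
        Nat.sub_self, List.drop_eq_getElem_cons hnH]
      simp [hinitn]
    by_cases hp : pvRowEmptyA og n
    · rw [if_pos hp, hrect' n (by omega), pvRowFold, hget,
        pvFillPrefix cost _ _ (by simp)]
      rw [List.set_append, if_neg (by omega), hlen, Nat.sub_self,
        List.drop_eq_getElem_cons hnH, List.set_cons_zero]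
      simp [hp, hinitn, List.append_assoc, List.drop_replicate]
    · rw [if_neg hp, List.drop_eq_getElem_cons hnH]
      simp [hp, hinitn, List.append_assoc]

-- the X pass maps a conditional column overwrite over the rows
theorem pvXFold (og : List (List String)) (cost : Int) (xs : List Nat)
    (cg : List (List Int)) (hlen : cg.length = og.length) :
    xs.foldl
      (fun cg x =>
        if pvColEmptyA og (Int.ofNat x) then
          (List.range og.length).foldl (fun cg y => pvSetCell cg y x cost) cg
        else cg) cg
    = cg.map (fun r =>
        xs.foldl (fun r x => if pvColEmptyA og (Int.ofNat x) then r.set x cost else r) r) := by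
  induction xs generalizing cg with
  | nil => simp
  | cons x xs ih =>
    simp only [List.foldl_cons, Int.ofNat_eq_natCast] at ih ⊢
    by_cases hq : pvColEmptyA og ((x : Nat) : Int)
    · rw [if_pos hq, pvColFold x cost og.length cg (by omega),
        List.take_of_length_le (by omega), List.drop_eq_nil_of_le (by omega),
        List.append_nil, ih _ (by simp [hlen])]
      simp [hq, List.map_map, Function.comp]
    · rw [if_neg hq, ih cg hlen]
      simp [hq]

-- normal form of port A on nonempty rectangular grids
theorem pvA_norm (og : List (List String)) (cost : Int) (hne : og ≠ [])
    (hrect : ∀ r ∈ og, r.length = (og.headD []).length) :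
    grid_expanded_costs og cost
      = (List.range og.length).map (fun y =>
          (List.range (og.headD []).length).map (fun (x : Nat) =>
            if pvColEmptyA og (Int.ofNat x) then cost
            else if pvRowEmptyA og y then cost else 1)) := by
  have hrect' : ∀ y < og.length, (og.getD y []).length = (og.headD []).length := by
    intro y hy
    rw [List.getD_eq_getElem _ _ hy]
    exact hrect _ (List.getElem_mem hy)
  simp only [grid_expanded_costs, if_neg hne]
  rw [pvYFold og cost og.length hrect' le_rfl]
  rw [List.drop_replicate, Nat.sub_self, List.replicate_zero, List.append_nil]
  rw [pvXFold og cost (List.range (og.headD []).length) _ (by simp)]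
  rw [List.map_map]
  apply List.map_congr_left
  intro y hy
  simp only [Function.comp_apply]
  rw [pvCondFillPrefix _ cost _ _ (by simp), List.drop_replicate, Nat.sub_self,
    List.replicate_zero, List.append_nil]
  apply List.map_congr_left
  intro x hx
  rw [List.getD_replicate _ (List.mem_range.mp hx)]

-- the inner enumerate fold of B: occupied-row/col membership after scanning one row
theorem pvInnerFold (y : Int) (r : List String) (s : Int)
    (st : PySem.Set Int × PySem.Set Int) (z : Int) :
    (z ∈ ((PySem.List.enumerate r s).foldl
        (fun st xe =>
          if xe.2 = "#" then (PySem.Set.add st.1 y, PySem.Set.add st.2 xe.1) else st) st).1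
      ↔ z ∈ st.1 ∨ (z = y ∧ "#" ∈ r)) ∧
    (z ∈ ((PySem.List.enumerate r s).foldl
        (fun st xe =>
          if xe.2 = "#" then (PySem.Set.add st.1 y, PySem.Set.add st.2 xe.1) else st) st).2
      ↔ z ∈ st.2 ∨ ∃ k : Nat, k < r.length ∧ z = s + (k : Int) ∧ r.getD k "" = "#") := by
  induction r generalizing s st with
  | nil => simp [PySem.List.enumerate_nil]
  | cons a rest ih =>
    rw [PySem.List.enumerate_cons]
    simp only [List.foldl_cons]
    by_cases ha : a = "#"
    · rw [if_pos ha]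
      obtain ⟨ih1, ih2⟩ := ih (s + 1) (PySem.Set.add st.1 y, PySem.Set.add st.2 s)
      constructor
      · rw [ih1]
        simp only [PySem.Set.mem_add, List.mem_cons]
        constructor
        · rintro ((h | h) | ⟨h1, h2⟩)
          · exact Or.inl h
          · exact Or.inr ⟨h, Or.inl ha.symm⟩
          · exact Or.inr ⟨h1, Or.inr h2⟩
        · rintro (h | ⟨h1, (h2 | h2)⟩)
          · exact Or.inl (Or.inl h)
          · exact Or.inl (Or.inr h1)
          · exact Or.inr ⟨h1, h2⟩
      · rw [ih2]
        simp only [PySem.Set.mem_add]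
        constructor
        · rintro ((h | h) | ⟨k, hk, hz, hd⟩)
          · exact Or.inl h
          · exact Or.inr ⟨0, by simp, by omega, by simpa using ha⟩
          · exact Or.inr ⟨k + 1, by simpa using hk, by push_cast; omega, by simpa using hd⟩
        · rintro (h | ⟨k, hk, hz, hd⟩)
          · exact Or.inl (Or.inl h)
          · cases k with
            | zero => exact Or.inl (Or.inr (by omega))
            | succ k =>
              exact Or.inr ⟨k, by simpa using hk, by push_cast at hz ⊢; omega, by simpa using hd⟩
    · rw [if_neg ha]
      obtain ⟨ih1, ih2⟩ := ih (s + 1) st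
      constructor
      · rw [ih1]
        constructor
        · rintro (h | ⟨h1, h2⟩)
          · exact Or.inl h
          · exact Or.inr ⟨h1, List.mem_cons_of_mem _ h2⟩
        · rintro (h | ⟨h1, h2⟩)
          · exact Or.inl h
          · rcases List.mem_cons.mp h2 with h2 | h2
            · exact absurd h2.symm ha
            · exact Or.inr ⟨h1, h2⟩
      · rw [ih2]
        constructor
        · rintro (h | ⟨k, hk, hz, hd⟩)
          · exact Or.inl h
          · exact Or.inr ⟨k + 1, by simpa using hk, by push_cast; omega, by simpa using hd⟩
        · rintro (h | ⟨k, hk, hz, hd⟩)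
          · exact Or.inl h
          · cases k with
            | zero => exact absurd (by simpa using hd) ha
            | succ k =>
              exact Or.inr ⟨k, by simpa using hk, by push_cast at hz ⊢; omega, by simpa using hd⟩

-- the outer enumerate fold of B: occupied-row/col membership over the whole grid
theorem pvOuterFold (og : List (List String)) (s : Int)
    (st : PySem.Set Int × PySem.Set Int) (z : Int) :
    (z ∈ ((PySem.List.enumerate og s).foldl
        (fun (st : PySem.Set Int × PySem.Set Int) yr =>
          (PySem.List.enumerate yr.2).foldl
            (fun st xe =>
              if xe.2 = "#" then (PySem.Set.add st.1 yr.1, PySem.Set.add st.2 xe.1) else st)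
            st) st).1
      ↔ z ∈ st.1 ∨ ∃ k : Nat, k < og.length ∧ z = s + (k : Int) ∧ "#" ∈ og.getD k []) ∧
    (z ∈ ((PySem.List.enumerate og s).foldl
        (fun (st : PySem.Set Int × PySem.Set Int) yr =>
          (PySem.List.enumerate yr.2).foldl
            (fun st xe =>
              if xe.2 = "#" then (PySem.Set.add st.1 yr.1, PySem.Set.add st.2 xe.1) else st)
            st) st).2
      ↔ z ∈ st.2 ∨ ∃ r ∈ og, ∃ j : Nat, j < r.length ∧ z = (j : Int) ∧ r.getD j "" = "#") := by
  induction og generalizing s st with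
  | nil => simp [PySem.List.enumerate_nil]
  | cons row rest ih =>
    rw [PySem.List.enumerate_cons]
    simp only [List.foldl_cons]
    set st1 := (PySem.List.enumerate row 0).foldl
      (fun st xe =>
        if xe.2 = "#" then (PySem.Set.add st.1 s, PySem.Set.add st.2 xe.1) else st) st with hst1
    obtain ⟨in1, in2⟩ := pvInnerFold s row 0 st z
    obtain ⟨ih1, ih2⟩ := ih (s + 1) st1
    constructor
    · rw [ih1, hst1, in1]
      constructor
      · rintro ((h | ⟨h1, h2⟩) | ⟨k, hk, hz, hd⟩)
        · exact Or.inl h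
        · exact Or.inr ⟨0, by simp, by omega, by simpa using h2⟩
        · exact Or.inr ⟨k + 1, by simpa using hk, by push_cast; omega, by simpa using hd⟩
      · rintro (h | ⟨k, hk, hz, hd⟩)
        · exact Or.inl (Or.inl h)
        · cases k with
          | zero => exact Or.inl (Or.inr ⟨by omega, by simpa using hd⟩)
          | succ k =>
            exact Or.inr ⟨k, by simpa using hk, by push_cast at hz ⊢; omega, by simpa using hd⟩
    · rw [ih2, hst1, in2]
      constructor
      · rintro ((h | ⟨k, hk, hz, hd⟩) | ⟨r, hr, j, hj, hz, hd⟩)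
        · exact Or.inl h
        · exact Or.inr ⟨row, List.mem_cons_self, k, hk, by omega, hd⟩
        · exact Or.inr ⟨r, List.mem_cons_of_mem _ hr, j, hj, hz, hd⟩
      · rintro (h | ⟨r, hr, j, hj, hz, hd⟩)
        · exact Or.inl (Or.inl h)
        · rcases List.mem_cons.mp hr with hr | hr
          · subst hr
            exact Or.inl (Or.inr ⟨j, hj, by omega, hd⟩)
          · exact Or.inr ⟨r, hr, j, hj, hz, hd⟩

-- normal form of port B on nonempty grids
theorem pvB_norm (og : List (List String)) (cost : Int) (hne : og ≠ []) :
    grid_expanded_costs_alt og cost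
      = og.map (fun row =>
          (List.range (og.headD []).length).map (fun x =>
            if (!(row.contains "#")) || og.all (fun row' => row'.getD x "" != "#") then cost
            else 1)) := by
  simp only [grid_expanded_costs_alt, if_neg hne]
  set occ := (PySem.List.enumerate og 0).foldl
    (fun (st : PySem.Set Int × PySem.Set Int) yr =>
      (PySem.List.enumerate yr.2).foldl
        (fun st xe =>
          if xe.2 = "#" then (PySem.Set.add st.1 yr.1, PySem.Set.add st.2 xe.1) else st)
        st) (PySem.Set.empty, PySem.Set.empty) with hocc
  apply List.ext_getElem (by simp)
  intro y hy1 hy2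
  have hyH : y < og.length := by simpa using hy2
  simp only [List.getElem_map, List.getElem_range]
  apply List.map_congr_left
  intro x hx
  simp only [Int.ofNat_eq_natCast]
  have hrow : PySem.Set.contains occ.1 (y : Int) = (og[y]'hyH).contains "#" := by
    rw [Bool.eq_iff_iff, PySem.Set.contains_iff, hocc,
      (pvOuterFold og 0 (PySem.Set.empty, PySem.Set.empty) (y : Int)).1,
      List.contains_iff_mem]
    constructor
    · rintro (h | ⟨k, hk, hz, hd⟩)
      · simp [PySem.Set.empty] at h
      · have : k = y := by omega
        subst this
        rwa [List.getD_eq_getElem og [] hyH] at hd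
    · intro h
      exact Or.inr ⟨y, hyH, by omega, by rwa [List.getD_eq_getElem og [] hyH]⟩
  have hcol : PySem.Set.contains occ.2 (x : Int)
      = !(og.all (fun row' => row'.getD x "" != "#")) := by
    rw [Bool.eq_iff_iff, PySem.Set.contains_iff, hocc,
      (pvOuterFold og 0 (PySem.Set.empty, PySem.Set.empty) (x : Int)).2]
    simp only [Bool.not_eq_eq_eq_not, Bool.not_true, List.all_eq_false, bne_eq_false_iff_eq]
    constructor
    · rintro (h | ⟨r, hr, j, hj, hz, hd⟩)
      · simp [PySem.Set.empty] at h
      · have : j = x := by omega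
        subst this
        exact ⟨r, hr, by simpa using hd⟩
    · rintro ⟨r, hr, hd0⟩
      have hd : r.getD x "" = "#" := by simpa using hd0
      have hxr : x < r.length := by
        by_contra hge
        rw [List.getD_eq_default _ _ (by omega)] at hd
        simp at hd
      exact Or.inr ⟨r, hr, x, hxr, rfl, hd⟩
  simp only [hrow, hcol]
  cases hc : (og[y]'hyH).contains "#" <;>
    cases ha : og.all (fun row' => row'.getD x "" != "#") <;> simp

-- minimality of idxOf
theorem pvIdxOf_min (l : List String) (a : String) (i : Nat) (hi : i < l.length)
    (h : l[i] = a) : l.idxOf a ≤ i := by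
  induction l generalizing i with
  | nil => simp at hi
  | cons b bs ih =>
    cases i with
    | zero =>
      simp at h
      simp [List.idxOf_cons, h]
    | succ i =>
      rw [List.idxOf_cons]
      cases hb : (b == a)
      · simp only [cond_false]
        have := ih i (by simpa using hi) (by simpa using h)
        omega
      · simp

-- the compact D_ condition restated as clean-above / dirty-below
theorem pvD_iff (og : List (List String)) (x : Nat) :
    (pvW og ≤ pvHx og x ∧ pvHx og x < og.length) ↔
      ((∀ y < pvW og, (og.getD y []).getD x "" ≠ "#") ∧
        ∃ y < og.length, pvW og ≤ y ∧ (og.getD y []).getD x "" = "#") := by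
  have hlen : (og.map fun r => r.getD x "").length = og.length := by simp
  have hHx : pvHx og x = List.idxOf "#" (og.map fun r => r.getD x "") := rfl
  have hcol : ∀ (y : Nat) (hy : y < og.length),
      (og.map fun r => r.getD x "")[y]'(by rw [hlen]; exact hy) = (og.getD y []).getD x "" := by
    intro y hy
    rw [List.getElem_map, List.getD_eq_getElem og [] hy]
  constructor
  · rintro ⟨hW, hH⟩
    refine ⟨?_, pvHx og x, hH, hW, ?_⟩
    · intro y hyW hdirty
      by_cases hyH : y < og.length
      · have hmin := pvIdxOf_min _ "#" y (by rw [hlen]; exact hyH)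
          (by rw [hcol y hyH]; exact hdirty)
        rw [hHx] at hW
        omega
      · rw [List.getD_eq_default og [] (by omega)] at hdirty
        simp at hdirty
    · rw [← hcol _ hH]
      exact List.getElem_idxOf (by rw [hlen]; exact hH)
  · rintro ⟨hclean, y0, hy0, hy0W, hdirty⟩
    have hmem : "#" ∈ (og.map fun r => r.getD x "") := by
      have h' : (og.map fun r => r.getD x "")[y0]'(by rw [hlen]; exact hy0) = "#" := by
        rw [hcol y0 hy0]
        exact hdirty
      exact h' ▸ List.getElem_mem _
    have hH : pvHx og x < og.length := by
      rw [hHx, ← hlen]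
      exact List.idxOf_lt_length_iff.mpr hmem
    refine ⟨?_, hH⟩
    by_contra hlt
    apply hclean (pvHx og x) (by omega)
    rw [← hcol _ hH]
    exact List.getElem_idxOf (by rw [hlen]; exact hH)

-- where no column is empty-above-but-dirty-below, A's truncated column scan agrees with B's
theorem pvColAgree (og : List (List String)) (x : Nat) (hne : og ≠ [])
    (hrect : ∀ r ∈ og, r.length = (og.headD []).length)
    (hx : x < (og.headD []).length)
    (hpre3 : (og.headD []).length ≤ og.length ∨
      ∀ x' < (og.headD []).length, ∃ y < og.length, (og.getD y []).getD x' "" = "#")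
    (hnb : ¬((∀ y < (og.headD []).length, (og.getD y []).getD x "" ≠ "#") ∧
      ∃ y < og.length, (og.headD []).length ≤ y ∧ (og.getD y []).getD x "" = "#")) :
    pvColEmptyA og (x : Int) = og.all (fun row => row.getD x "" != "#") := by
  rw [Bool.eq_iff_iff, pvColEmptyA_eq_true_iff og x hrect hx, List.all_eq_true,
    List.forall_mem_iff_forall_getElem]
  have hrow : ∀ (i : Nat) (hi : i < og.length),
      (((og[i]'hi).getD x "" != "#") = true ↔ (og.getD i []).getD x "" ≠ "#") := by
    intro i hi
    rw [List.getD_eq_getElem og [] hi]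
    simp [bne_iff_ne]
  by_cases hWH : (og.headD []).length ≤ og.length
  · rw [Nat.min_eq_left hWH]
    constructor
    · intro hcl i hi
      rw [hrow i hi]
      by_cases hiW : i < (og.headD []).length
      · exact hcl i hiW
      · intro hdirty
        exact hnb ⟨hcl, i, hi, by omega, hdirty⟩
    · intro hall i hiW
      rw [← hrow i (by omega)]
      exact hall i (by omega)
  · rw [Nat.min_eq_right (by omega)]
    have hall := hpre3.resolve_left (by omega)
    obtain ⟨y0, hy0, hd⟩ := hall x hx
    constructor
    · intro hcl _ _
      exact absurd hd (hcl y0 hy0)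
    · intro hall2 i hi
      exfalso
      exact ((hrow y0 hy0).mp (hall2 y0 hy0)) hd

theorem grid_expanded_costs_spec : Claim_unchanged_grid_expanded_costs := by
  intro og cost hdom hpre hnd
  obtain ⟨hne, hrect, hpre3⟩ := hpre
  simp only [pvW, pvCell] at hrect hpre3
  show grid_expanded_costs og cost = grid_expanded_costs_alt og cost
  rw [pvA_norm og cost hne hrect, pvB_norm og cost hne]
  have hnd' : cost = 1 ∨ ∀ x < (og.headD []).length,
      ¬((∀ y < (og.headD []).length, (og.getD y []).getD x "" ≠ "#") ∧
        ∃ y < og.length, (og.headD []).length ≤ y ∧ (og.getD y []).getD x "" = "#") := by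
    by_cases hc : cost = 1
    · exact Or.inl hc
    · right
      intro x hx hbad
      refine hnd ⟨hc, x, ?_, (pvD_iff og x).mpr hbad⟩
      simpa [pvW] using hx
  apply List.ext_getElem (by simp)
  intro y hy1 hy2
  have hyH : y < og.length := by simpa using hy2
  simp only [List.getElem_map, List.getElem_range, Int.ofNat_eq_natCast]
  have hpy : pvRowEmptyA og y = !((og[y]'hyH).contains "#") := by
    unfold pvRowEmptyA
    rw [List.getD_eq_getElem og [] hyH, pvRowLoopA_eq_contains]
  rcases hnd' with hc | hnb
  · subst hc
    apply List.map_congr_left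
    intro x _
    split_ifs <;> rfl
  · apply List.map_congr_left
    intro x hx
    have hxW := List.mem_range.mp hx
    rw [pvColAgree og x hne hrect hxW hpre3 (hnb x hxW), hpy]
    cases hq : og.all (fun row => row.getD x "" != "#") <;>
      cases hcnt : (og[y]'hyH).contains "#" <;> simp [hq, hcnt]

theorem grid_expanded_costs_changed : Claim_changed_grid_expanded_costs := by
  unfold Claim_changed_grid_expanded_costs; decide

theorem grid_expanded_costs_tight : Claim_exact_grid_expanded_costs := by
  intro og cost hdom hpre hd
  obtain ⟨hne, hrect, _⟩ := hpre
  obtain ⟨hc1, x, hx, hDx⟩ := hd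
  obtain ⟨hclean, y0, hy0H, hy0W, hdirty⟩ := (pvD_iff og x).mp hDx
  simp only [pvW] at hrect hx hy0W hclean
  intro heq
  rw [pvA_norm og cost hne hrect, pvB_norm og cost hne] at heq
  simp only [Int.ofNat_eq_natCast] at heq
  have hx0 : x < (og[y0]'hy0H).length := by
    rw [hrect _ (List.getElem_mem hy0H)]
    exact hx
  have hdirty' : (og[y0]'hy0H)[x]'hx0 = "#" := by
    have h := hdirty
    rw [List.getD_eq_getElem og [] hy0H, List.getD_eq_getElem _ _ hx0] at h
    exact h
  have hrowEq := congrArg (fun l => l[y0]?) heq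
  simp only [List.getElem?_map, List.getElem?_range hy0H,
    List.getElem?_eq_getElem hy0H, Option.map_some] at hrowEq
  have hrowEq' := Option.some.inj hrowEq
  have hcellEq := congrArg (fun l => l[x]?) hrowEq'
  simp only [List.getElem?_map, List.getElem?_range hx, Option.map_some] at hcellEq
  have hcellEq' := Option.some.inj hcellEq
  have hcolA : pvColEmptyA og ((x : Nat) : Int) = true := by
    rw [pvColEmptyA_eq_true_iff og x hrect hx]
    intro i hi
    exact hclean i (by omega)
  have hmem : "#" ∈ og[y0]'hy0H := by
    rw [← hdirty']
    exact List.getElem_mem hx0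
  have hcontains : (og[y0]'hy0H).contains "#" = true := List.contains_iff_mem.mpr hmem
  have hall : og.all (fun row => row.getD x "" != "#") = false := by
    rw [List.all_eq_false]
    refine ⟨og[y0]'hy0H, List.getElem_mem hy0H, ?_⟩
    rw [List.getD_eq_getElem _ _ hx0, hdirty']
    simp
  simp only [Int.ofNat_eq_natCast, hcolA, hcontains, hall] at hcellEq'
  simp at hcellEq'
  exact hc1 hcellEq'
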